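-- pv_equiv track=rewrite | github.com/BioinformaticaUNQ/TP-Conservacion-Cicovich-Alvarez | tp_final/core/fasta.py | createFasta
-- ===== SOURCE A (Python) =====
-- def createFasta(description, identifier, sequence):
--     parsedSequence = ""
--     counter = 1
--     for char in sequence:
--         if(counter % 80 == 0):
--             parsedSequence = parsedSequence + char + "\n"
--         else:
--             parsedSequence = parsedSequence + char
--         counter+=1
--     return ">" + identifier + "|" + description + "\n" + parsedSequence
-- ===== SOURCE B (Python) =====
-- def createFasta(description, identifier, sequence):
--     chunks = [sequence[i:i+80] for i in range(0, len(sequence), 80)]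
--     body = "".join(c + ("\n" if len(c) == 80 else "") for c in chunks)
--     return ">" + identifier + "|" + description + "\n" + body
-- ===== Notes on version B (the rewrite author's own statement) =====
-- stated objective: faster
-- what changed: B slices the sequence into 80-char blocks with a range/slice comprehension and joins them (newline after each full block), replacing A's per-character loop that rebuilds the string by repeated concatenation.
import Mathlib
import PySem

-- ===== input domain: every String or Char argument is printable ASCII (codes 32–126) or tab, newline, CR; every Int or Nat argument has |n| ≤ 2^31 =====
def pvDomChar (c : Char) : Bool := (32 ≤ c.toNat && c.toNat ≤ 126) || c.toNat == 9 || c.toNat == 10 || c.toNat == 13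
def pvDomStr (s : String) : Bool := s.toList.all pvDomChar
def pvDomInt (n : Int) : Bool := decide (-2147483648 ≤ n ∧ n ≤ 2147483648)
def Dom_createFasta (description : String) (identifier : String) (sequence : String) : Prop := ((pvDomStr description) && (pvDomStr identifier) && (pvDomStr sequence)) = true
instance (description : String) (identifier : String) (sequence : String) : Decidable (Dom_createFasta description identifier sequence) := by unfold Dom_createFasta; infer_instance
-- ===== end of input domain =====

-- B replaces A's per-character counter loop by slicing the sequence into 80-char
-- blocks and joining them (idiomatic decomposition); return values proved equal.

-- ===== PORT A =====
-- A's loop: for char in sequence, append char (plus '\n' when counter % 80 == 0),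
-- counter incremented each step.  Ported over List Char (exact: Python str concat
-- on these arguments is character-list concatenation).
def createFastaLoop : List Char → List Char → Nat → List Char
  | [], parsed, _ => parsed
  | c :: rest, parsed, counter =>
    if counter % 80 = 0 then createFastaLoop rest (parsed ++ [c, '\n']) (counter + 1)
    else createFastaLoop rest (parsed ++ [c]) (counter + 1)

def createFasta (description : String) (identifier : String) (sequence : String) : String :=
  String.ofList ('>' :: identifier.toList ++ '|' :: description.toList ++ '\n' ::
    createFastaLoop sequence.toList [] 1)

-- ===== PORT B =====
-- Source B: chunks = [sequence[i:i+80] ...]; each slice of a list is take 80 of drop i,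
-- realised as structural recursion taking 80 and dropping 80.
def createFastaChunks (l : List Char) : List (List Char) :=
  if l = [] then [] else l.take 80 :: createFastaChunks (l.drop 80)
termination_by l.length
decreasing_by
  rename_i h
  have : l.length ≠ 0 := fun h0 => h (List.eq_nil_of_length_eq_zero h0)
  simp [List.length_drop]; omega

def createFasta_alt (description : String) (identifier : String) (sequence : String) : String :=
  String.ofList ('>' :: identifier.toList ++ '|' :: description.toList ++ '\n' ::
    (createFastaChunks sequence.toList).flatMap
      (fun c => if c.length = 80 then c ++ ['\n'] else c))

-- ===== PRECONDITION & SPEC =====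
def Spec_createFasta (description : String) (identifier : String) (sequence : String) (out : String) : Prop := out = createFasta_alt description identifier sequence
instance (description : String) (identifier : String) (sequence : String) (out : String) : Decidable (Spec_createFasta description identifier sequence out) := by unfold Spec_createFasta; infer_instance

-- ===== CLAIM (what is proved, stated in full; the proofs are below) =====
def Claim_equal_createFasta : Prop := ∀ (description : String) (identifier : String) (sequence : String), Dom_createFasta description identifier sequence → Spec_createFasta description identifier sequence (createFasta description identifier sequence)

-- ===== LEMMAS AND PROOFS =====

-- A's loop only looks at the counter mod 80.
theorem createFastaLoop_mod (l : List Char) : ∀ (acc : List Char) (k1 k2 : Nat),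
    k1 % 80 = k2 % 80 → createFastaLoop l acc k1 = createFastaLoop l acc k2 := by
  induction l with
  | nil => intro acc k1 k2 _; rfl
  | cons c rest ih =>
    intro acc k1 k2 h
    simp only [createFastaLoop, h]
    have h' : (k1 + 1) % 80 = (k2 + 1) % 80 := by omega
    split_ifs <;> exact ih _ _ _ h'

-- A short tail (never reaching a multiple of 80) is appended verbatim.
theorem createFastaLoop_partial (l : List Char) : ∀ (acc : List Char) (j : Nat),
    j + l.length < 80 → createFastaLoop l acc (j + 1) = acc ++ l := by
  induction l with
  | nil => intro acc j _; simp [createFastaLoop]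
  | cons c rest ih =>
    intro acc j h
    simp only [List.length_cons] at h
    have hne : (j + 1) % 80 ≠ 0 := by omega
    simp only [createFastaLoop, if_neg hne]
    have := ih (acc ++ [c]) (j + 1) (by omega)
    simpa using this

-- Consuming a block that ends exactly at a multiple of 80 emits the block plus '\n'
-- and restarts the counter (mod 80) at 1.
theorem createFastaLoop_block (pre : List Char) : ∀ (rest acc : List Char) (j : Nat),
    pre.length + j = 80 → j < 80 →
    createFastaLoop (pre ++ rest) acc (j + 1) =
      createFastaLoop rest (acc ++ pre ++ ['\n']) 1 := by
  induction pre with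
  | nil => intro rest acc j h hj; simp at h; omega
  | cons c pre' ih =>
    intro rest acc j h hj
    simp only [List.length_cons] at h
    by_cases hp : pre' = []
    · subst hp
      simp at h
      have hj79 : j = 79 := by omega
      subst hj79
      simp only [List.nil_append, List.cons_append, createFastaLoop]
      norm_num
      have := createFastaLoop_mod rest (acc ++ [c, '\n']) 81 1 (by norm_num)
      simpa using this
    · have hlen : pre'.length ≠ 0 := fun h0 => hp (List.eq_nil_of_length_eq_zero h0)
      have hne : (j + 1) % 80 ≠ 0 := by omega
      simp only [List.cons_append, createFastaLoop, if_neg hne]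
      have := ih rest (acc ++ [c]) (j + 1) (by omega) (by omega)
      simpa using this

-- Main invariant: A's loop from counter 1 produces B's chunked body.
theorem createFastaLoop_eq (n : Nat) : ∀ (l : List Char), l.length ≤ n → ∀ (acc : List Char),
    createFastaLoop l acc 1 =
      acc ++ (createFastaChunks l).flatMap
        (fun c => if c.length = 80 then c ++ ['\n'] else c) := by
  induction n with
  | zero =>
    intro l hl acc
    have : l = [] := List.eq_nil_of_length_eq_zero (by omega)
    subst this
    simp [createFastaLoop, createFastaChunks]
  | succ n ih =>
    intro l hl acc
    by_cases h0 : l = []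
    · subst h0; simp [createFastaLoop, createFastaChunks]
    · rw [createFastaChunks, if_neg h0]
      by_cases hlen : l.length < 80
      · have htake : l.take 80 = l := List.take_of_length_le (by omega)
        have hdrop : l.drop 80 = [] := List.drop_of_length_le (by omega)
        have := createFastaLoop_partial l acc 0 (by omega)
        rw [hdrop, htake]
        rw [createFastaChunks]
        simp only [List.flatMap_cons]
        rw [if_neg (by omega)]
        simpa using this
      · -- l.length ≥ 80: one full block then recurse
        have hsplit : l = l.take 80 ++ l.drop 80 := (List.take_append_drop 80 l).symm
        have htlen : (l.take 80).length = 80 := by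
          simp [List.length_take]; omega
        have h1 : createFastaLoop l acc 1 =
            createFastaLoop (l.drop 80) (acc ++ l.take 80 ++ ['\n']) 1 := by
          conv_lhs => rw [hsplit]
          exact createFastaLoop_block (l.take 80) (l.drop 80) acc 0 (by omega) (by omega)
        have hdlen : (l.drop 80).length ≤ n := by
          simp [List.length_drop]; omega
        rw [h1, ih (l.drop 80) hdlen]
        simp [htlen, List.flatMap_cons, List.append_assoc]

-- ===== VERDICT (by name: the statement is the Claim_ definition above) =====
theorem createFasta_spec : Claim_equal_createFasta := by
  intro description identifier sequence _
  unfold Spec_createFasta createFasta createFasta_alt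
  rw [createFastaLoop_eq sequence.toList.length sequence.toList (le_refl _) []]
  simp
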